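-- pv_equiv track=rewrite | github.com/randyharnarinesingh/udemy_11-essential-coding-interview-questions | rotate.py | increment_position
-- ===== SOURCE A (Python) =====
-- def increment_position(posi,posj,increments,a,b,c,d) : # helper function used to assist in single swaps of array elements
--     count = 0
--     while count < increments :
--         if posi == a and posj < d :
--             posj += 1
--         elif posj == d and posi < b :
--             posi += 1
--         elif posi == b and posj > c :
--             posj -= 1
--         elif posj == c and posi > a :
--             posi -= 1
--         count += 1
--     return posi, posj
-- ===== SOURCE B (Python) =====
-- def increment_position(posi, posj, increments, a, b, c, d):
--     # Cycle-detection fast-forward: the walk is eventually periodic, so memoize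
--     # the first time each position is seen; on a revisit, jump ahead modulo the
--     # period and finish with the few remaining steps.
--     def step(p):
--         i, j = p
--         if i == a and j < d:
--             return (i, j + 1)
--         elif j == d and i < b:
--             return (i + 1, j)
--         elif i == b and j > c:
--             return (i, j - 1)
--         elif j == c and i > a:
--             return (i - 1, j)
--         return (i, j)
--
--     seen = {}
--     pos = (posi, posj)
--     t = 0
--     while t < increments:
--         if pos in seen:
--             rem = (increments - t) % (t - seen[pos])
--             for _ in range(rem):
--                 pos = step(pos)
--             return pos
--         seen[pos] = t
--         pos = step(pos)
--         t += 1
--     return pos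
-- ===== Notes on version B (the rewrite author's own statement) =====
-- stated objective: faster
-- what changed: B replaces A's step-by-step loop over all `increments` iterations with cycle detection: it memoizes the first time each position is visited and, on a revisit, jumps ahead by (increments - t) mod period, so only O(orbit length) steps are simulated instead of O(increments).
import Mathlib
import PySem

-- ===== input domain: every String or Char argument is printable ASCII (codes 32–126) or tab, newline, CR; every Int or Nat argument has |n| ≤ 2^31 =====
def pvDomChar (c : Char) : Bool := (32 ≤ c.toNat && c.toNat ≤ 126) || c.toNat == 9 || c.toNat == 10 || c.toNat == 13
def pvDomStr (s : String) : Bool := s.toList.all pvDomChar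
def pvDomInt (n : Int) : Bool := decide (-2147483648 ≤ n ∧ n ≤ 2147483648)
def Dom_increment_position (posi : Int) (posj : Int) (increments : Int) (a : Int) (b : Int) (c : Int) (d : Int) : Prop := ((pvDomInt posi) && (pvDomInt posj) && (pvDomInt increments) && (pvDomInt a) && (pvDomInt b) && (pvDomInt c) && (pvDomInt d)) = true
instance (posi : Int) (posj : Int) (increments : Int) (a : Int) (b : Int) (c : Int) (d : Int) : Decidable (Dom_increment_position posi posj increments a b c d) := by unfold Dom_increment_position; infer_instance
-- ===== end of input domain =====

-- B replaces A's O(increments) step-by-step walk with cycle detection (memoize first-visit times,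
-- fast-forward modulo the period), proved to return the same pair on every input.


-- ===== PORT A =====
-- A's while loop: `fuel` plays the role of `increments - count` (Python int semantics:
-- the loop body runs exactly max(increments, 0) times).
def incLoopA (a b c d : Int) (fuel : Nat) (posi posj : Int) : Int × Int :=
  match fuel with
  | 0 => (posi, posj)
  | f + 1 =>
    if posi = a ∧ posj < d then incLoopA a b c d f posi (posj + 1)
    else if posj = d ∧ posi < b then incLoopA a b c d f (posi + 1) posj
    else if posi = b ∧ posj > c then incLoopA a b c d f posi (posj - 1)
    else if posj = c ∧ posi > a then incLoopA a b c d f (posi - 1) posj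
    else incLoopA a b c d f posi posj

def increment_position (posi : Int) (posj : Int) (increments : Int) (a : Int) (b : Int) (c : Int) (d : Int) : List Int :=
  let p := incLoopA a b c d increments.toNat posi posj
  [p.1, p.2]

-- ===== PORT B =====
-- B's `step` closure
def bStep (a b c d : Int) (p : Int × Int) : Int × Int :=
  if p.1 = a ∧ p.2 < d then (p.1, p.2 + 1)
  else if p.2 = d ∧ p.1 < b then (p.1 + 1, p.2)
  else if p.1 = b ∧ p.2 > c then (p.1, p.2 - 1)
  else if p.2 = c ∧ p.1 > a then (p.1 - 1, p.2)
  else p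

-- B's `for _ in range(rem): pos = step(pos)`
def bRun (a b c d : Int) (n : Nat) (p : Int × Int) : Int × Int :=
  match n with
  | 0 => p
  | k + 1 => bRun a b c d k (bStep a b c d p)

-- B's `while t < increments` loop with the memo dict; fuel = increments - t
def bLoop (a b c d N : Int) (fuel : Nat) (seen : PySem.Dict (Int × Int) Int) (pos : Int × Int) (t : Int) : Int × Int :=
  match fuel with
  | 0 => pos
  | f + 1 =>
    match PySem.Dict.get? seen pos with
    | some s => bRun a b c d (PySem.Int.mod (N - t) (t - s)).toNat pos
    | none => bLoop a b c d N f (PySem.Dict.insert seen pos t) (bStep a b c d pos) (t + 1)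

def increment_position_alt (posi : Int) (posj : Int) (increments : Int) (a : Int) (b : Int) (c : Int) (d : Int) : List Int :=
  let p := bLoop a b c d increments increments.toNat PySem.Dict.empty (posi, posj) 0
  [p.1, p.2]

-- ===== PRECONDITION & SPEC =====
def Spec_increment_position (posi : Int) (posj : Int) (increments : Int) (a : Int) (b : Int) (c : Int) (d : Int) (out : List Int) : Prop := out = increment_position_alt posi posj increments a b c d
instance (posi : Int) (posj : Int) (increments : Int) (a : Int) (b : Int) (c : Int) (d : Int) (out : List Int) : Decidable (Spec_increment_position posi posj increments a b c d out) := by unfold Spec_increment_position; infer_instance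

-- ===== CLAIM (what is proved, stated in full; the proofs are below) =====
def Claim_equal_increment_position : Prop := ∀ (posi : Int) (posj : Int) (increments : Int) (a : Int) (b : Int) (c : Int) (d : Int), Dom_increment_position posi posj increments a b c d → Spec_increment_position posi posj increments a b c d (increment_position posi posj increments a b c d)

-- ===== LEMMAS AND PROOFS =====

theorem bRun_add (a b c d : Int) (m n : Nat) (p : Int × Int) :
    bRun a b c d (m + n) p = bRun a b c d n (bRun a b c d m p) := by
  induction m generalizing p with
  | zero => rw [Nat.zero_add]; rfl
  | succ m ih =>
    rw [Nat.succ_add]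
    show bRun a b c d (m + n) (bStep a b c d p) = _
    rw [ih]
    rfl

theorem bRun_succ' (a b c d : Int) (k : Nat) (p : Int × Int) :
    bRun a b c d (k + 1) p = bStep a b c d (bRun a b c d k p) := by
  rw [bRun_add]
  rfl

-- A's loop computes exactly the iterate of B's step function
theorem incLoopA_eq_bRun (a b c d : Int) (f : Nat) (i j : Int) :
    incLoopA a b c d f i j = bRun a b c d f (i, j) := by
  induction f generalizing i j with
  | zero => rfl
  | succ f ih =>
    show (if i = a ∧ j < d then incLoopA a b c d f i (j + 1)
      else if j = d ∧ i < b then incLoopA a b c d f (i + 1) j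
      else if i = b ∧ j > c then incLoopA a b c d f i (j - 1)
      else if j = c ∧ i > a then incLoopA a b c d f (i - 1) j
      else incLoopA a b c d f i j) = bRun a b c d f (bStep a b c d (i, j))
    simp only [bStep]
    split_ifs <;> exact ih _ _

-- fast-forwarding along a period
theorem bRun_mod (a b c d : Int) (per : Nat) (hper : 0 < per) (p : Int × Int)
    (hp : bRun a b c d per p = p) (n : Nat) :
    bRun a b c d n p = bRun a b c d (n % per) p := by
  induction n using Nat.strong_induction_on with
  | _ n ih =>
    by_cases h : n < per
    · rw [Nat.mod_eq_of_lt h]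
    · have h1 : n = per + (n - per) := by omega
      rw [h1, bRun_add, hp, ih (n - per) (by omega), Nat.add_mod_left]

-- loop invariant for B's memoized walk: every memo entry (p ↦ s) satisfies s < t and
-- p reaches the current position in t - s steps; then the loop computes the plain iterate.
theorem bLoop_eq_bRun (a b c d N : Int) (fuel : Nat) :
    ∀ (seen : PySem.Dict (Int × Int) Int) (pos : Int × Int) (t : Int),
    (fuel ≠ 0 → N - t = fuel) →
    (∀ s p, PySem.Dict.get? seen p = some s → s < t ∧ bRun a b c d (t - s).toNat p = pos) →
    bLoop a b c d N fuel seen pos t = bRun a b c d fuel pos := by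
  induction fuel with
  | zero => intro seen pos t _ _; rfl
  | succ f ih =>
    intro seen pos t h1 h2
    have hN : N - t = (f : Int) + 1 := by
      have := h1 (by omega); push_cast at this ⊢; omega
    show (match PySem.Dict.get? seen pos with
      | some s => bRun a b c d (PySem.Int.mod (N - t) (t - s)).toNat pos
      | none => bLoop a b c d N f (PySem.Dict.insert seen pos t) (bStep a b c d pos) (t + 1)) = _
    cases hg : PySem.Dict.get? seen pos with
    | some s =>
      show bRun a b c d (PySem.Int.mod (N - t) (t - s)).toNat pos = bRun a b c d (f + 1) pos
      obtain ⟨hst, hper⟩ := h2 s pos hg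
      have hpos : (0 : Int) < t - s := by omega
      have hperpos : 0 < (t - s).toNat := by omega
      rw [bRun_mod a b c d (t - s).toNat hperpos pos hper (f + 1)]
      congr 1
      rw [PySem.Int.mod_eq_emod_of_pos hpos, hN]
      have hts : (t - s) = ((t - s).toNat : Int) := by omega
      rw [hts]
      rw [show ((f : Int) + 1) = ((f + 1 : Nat) : Int) by push_cast; ring]
      rw [← Int.natCast_emod, Int.toNat_natCast, Int.toNat_natCast]
    | none =>
      show bLoop a b c d N f (PySem.Dict.insert seen pos t) (bStep a b c d pos) (t + 1)
        = bRun a b c d (f + 1) pos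
      rw [ih (PySem.Dict.insert seen pos t) (bStep a b c d pos) (t + 1)
        (fun _ => by omega) ?_]
      · rfl
      · intro s p hp
        rw [PySem.Dict.get?_insert] at hp
        split_ifs at hp with hpeq
        · subst hpeq
          injection hp with hs
          subst hs
          exact ⟨by omega, by rw [show (t + 1 - t).toNat = 1 by omega]; rfl⟩
        · obtain ⟨hst, hrun⟩ := h2 s p hp
          refine ⟨by omega, ?_⟩
          rw [show (t + 1 - s).toNat = (t - s).toNat + 1 by omega, bRun_succ', hrun]

-- ===== VERDICT (by name: the statement is the Claim_ definition above) =====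
theorem increment_position_spec : Claim_equal_increment_position := by
  intro posi posj increments a b c d _
  unfold Spec_increment_position increment_position increment_position_alt
  rw [incLoopA_eq_bRun,
    bLoop_eq_bRun a b c d increments increments.toNat PySem.Dict.empty (posi, posj) 0
      (fun h => by omega)
      (fun s p hp => by rw [PySem.Dict.get?_empty] at hp; exact absurd hp (by simp))]
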